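-- pv_equiv track=rewrite | github.com/unipjh/Algorithm_Lab_Team_PT | data_manager.py | parse_edge_list
-- ===== SOURCE A (Python) =====
-- def parse_edge_list(file_content_str: str):
--     """
--     Parses raw string content (from text area or file) into nodes and edges.
--     Expected Format: "NodeA NodeB" per line.
--     """
--     edges = []
--     nodes = set()
--
--     # Use splitlines() to handle different line endings (Windows/Linux) robustly
--     lines = file_content_str.strip().splitlines()
--
--     for line in lines:
--         parts = line.strip().split()
--
--         # Ensure at least two parts exist (Source, Target)
--         if len(parts) >= 2:
--             u, v = parts[0], parts[1]
--
--             # Validation: Ignore empty strings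
--             if u and v:
--                 edges.append((u, v))
--                 nodes.add(u)
--                 nodes.add(v)
--
--     # Return sorted nodes for consistent ordering in UI
--     return sorted(list(nodes)), edges
-- ===== SOURCE B (Python) =====
-- def parse_edge_list(file_content_str: str):
--     """Staged passes with no set: edges from a comprehension over the token
--     rows, then nodes by sorting ALL endpoints (duplicates included) and a
--     prev-scan that drops adjacent duplicates."""
--     token_rows = [line.strip().split()
--                   for line in file_content_str.strip().splitlines()]
--     edges = [(p[0], p[1]) for p in token_rows if len(p) >= 2]
--     endpoints = sorted([n for e in edges for n in e])
--     nodes = []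
--     prev = None
--     for x in endpoints:
--         if x != prev:
--             nodes.append(x)
--             prev = x
--     return nodes, edges
-- ===== Notes on version B (the rewrite author's own statement) =====
-- stated objective: alternative
-- what changed: A's single fused loop that appends edges while maintaining a node set (sorted at the end) is replaced by staged passes with no set at all: a comprehension builds the edges, then all endpoints (duplicates included) are sorted and a prev-scan drops adjacent duplicates to produce the node list.
import Mathlib
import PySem

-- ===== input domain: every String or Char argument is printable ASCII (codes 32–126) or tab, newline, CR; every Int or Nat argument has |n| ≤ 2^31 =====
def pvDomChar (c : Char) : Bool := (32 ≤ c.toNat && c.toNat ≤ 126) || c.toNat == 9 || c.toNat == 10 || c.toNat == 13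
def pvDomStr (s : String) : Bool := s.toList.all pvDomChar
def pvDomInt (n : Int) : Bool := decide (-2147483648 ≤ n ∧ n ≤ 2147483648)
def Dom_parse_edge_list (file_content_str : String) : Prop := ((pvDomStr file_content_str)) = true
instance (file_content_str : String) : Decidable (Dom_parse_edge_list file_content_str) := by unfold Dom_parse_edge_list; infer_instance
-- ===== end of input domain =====

-- B replaces A's fused loop (edges appended while a node set is maintained, sorted at the end)
-- by staged passes with no set at all: edges from a comprehension, then nodes by sorting ALL
-- endpoints with duplicates and a prev-scan dropping adjacent duplicates; objective: alternative.

-- ===== PORT A =====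
def parse_edge_list (file_content_str : String) : List String × (List (String × String)) :=
  let lines := PySem.Chars.splitlines (PySem.Chars.strip file_content_str.toList)
  let st := lines.foldl (fun (st : List (String × String) × PySem.Set String) line =>
    let parts := PySem.Chars.split₀ (PySem.Chars.strip line)
    if 2 ≤ parts.length then
      let u : String := String.ofList (PySem.List.pyGetD parts 0 [])
      let v : String := String.ofList (PySem.List.pyGetD parts 1 [])
      if u ≠ "" ∧ v ≠ "" then
        (st.1 ++ [(u, v)], PySem.Set.add (PySem.Set.add st.2 u) v)
      else st
    else st) ([], PySem.Set.empty)
  (PySem.List.sorted st.2 (fun x => x) false, st.1)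

-- ===== PORT B =====
def parse_edge_list_alt (file_content_str : String) : List String × (List (String × String)) :=
  let tokenRows := (PySem.Chars.splitlines (PySem.Chars.strip file_content_str.toList)).map
      (fun line => PySem.Chars.split₀ (PySem.Chars.strip line))
  let edges := (tokenRows.filter (fun p => decide (2 ≤ p.length))).map
      (fun p => (String.ofList (PySem.List.pyGetD p 0 []), String.ofList (PySem.List.pyGetD p 1 [])))
  let endpoints := PySem.List.sorted (edges.flatMap (fun e => [e.1, e.2])) (fun x => x) false
  -- prev-scan: state is (nodes so far, prev : Option String); Python's 'x != prev' with prev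
  -- initially None is exactly 'some x ≠ prev'
  let st := endpoints.foldl
      (fun (st : List String × Option String) x =>
        if some x ≠ st.2 then (st.1 ++ [x], some x) else st) ([], none)
  (st.1, edges)

-- ===== PRECONDITION & SPEC =====
def Spec_parse_edge_list (file_content_str : String) (out : List String × (List (String × String))) : Prop := out = parse_edge_list_alt file_content_str
instance (file_content_str : String) (out : List String × (List (String × String))) : Decidable (Spec_parse_edge_list file_content_str out) := by unfold Spec_parse_edge_list; infer_instance

-- ===== CLAIM (what is proved, stated in full; the proofs are below) =====
def Claim_equal_parse_edge_list : Prop := ∀ (file_content_str : String), Dom_parse_edge_list file_content_str → Spec_parse_edge_list file_content_str (parse_edge_list file_content_str)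

-- ===== LEMMAS AND PROOFS =====

-- every token produced by Python's str.split() is non-empty
lemma split0_go_ne_nil (s cur : List Char) (acc : List (List Char))
    (hacc : ∀ a ∈ acc, a ≠ []) :
    ∀ t ∈ PySem.Chars.split₀.go s cur acc, t ≠ [] := by
  induction s generalizing cur acc with
  | nil =>
    intro t ht
    unfold PySem.Chars.split₀.go at ht
    split_ifs at ht with h
    · exact hacc t (List.mem_reverse.mp ht)
    · rcases List.mem_cons.mp (List.mem_reverse.mp ht) with h1 | h1
      · simp only [h1, ne_eq, List.reverse_eq_nil_iff]
        simpa [List.isEmpty_iff] using h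
      · exact hacc t h1
  | cons c rest ih =>
    intro t ht
    unfold PySem.Chars.split₀.go at ht
    split_ifs at ht with h1 h2
    · exact ih [] acc hacc t ht
    · refine ih [] (cur.reverse :: acc) ?_ t ht
      intro a ha
      rcases List.mem_cons.mp ha with ha | ha
      · subst ha
        simp only [ne_eq, List.reverse_eq_nil_iff]
        simpa [List.isEmpty_iff] using h2
      · exact hacc a ha
    · exact ih (c :: cur) acc hacc t ht

lemma split0_ne_nil (s : List Char) : ∀ t ∈ PySem.Chars.split₀ s, t ≠ [] :=
  split0_go_ne_nil s [] [] (by simp)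

lemma ofList_ne_empty {t : List Char} (h : t ≠ []) : String.ofList t ≠ "" := by
  intro hc
  apply h
  have := congrArg String.toList hc
  simpa using this

-- B's edges and endpoints, as proof-side shorthands
def pvEdges (lines : List (List Char)) : List (String × String) :=
  ((lines.map (fun line => PySem.Chars.split₀ (PySem.Chars.strip line))).filter
    (fun p => decide (2 ≤ p.length))).map
    (fun p => (String.ofList (PySem.List.pyGetD p 0 []), String.ofList (PySem.List.pyGetD p 1 [])))

def pvNodes (lines : List (List Char)) : List String :=
  (pvEdges lines).flatMap (fun e => [e.1, e.2])

-- A's loop computes B's edges and a set updated with B's flattened endpoints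
lemma foldA_eq (lines : List (List Char)) (es : List (String × String)) (ns : PySem.Set String) :
    lines.foldl (fun (st : List (String × String) × PySem.Set String) line =>
      let parts := PySem.Chars.split₀ (PySem.Chars.strip line)
      if 2 ≤ parts.length then
        let u : String := String.ofList (PySem.List.pyGetD parts 0 [])
        let v : String := String.ofList (PySem.List.pyGetD parts 1 [])
        if u ≠ "" ∧ v ≠ "" then
          (st.1 ++ [(u, v)], PySem.Set.add (PySem.Set.add st.2 u) v)
        else st
      else st) (es, ns)
    = (es ++ pvEdges lines, PySem.Set.update ns (pvNodes lines)) := by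
  induction lines generalizing es ns with
  | nil => simp [pvEdges, pvNodes, PySem.Set.update]
  | cons l ls ih =>
    simp only [List.foldl_cons]
    by_cases h : 2 ≤ (PySem.Chars.split₀ (PySem.Chars.strip l)).length
    · have h0 : PySem.List.pyGetD (PySem.Chars.split₀ (PySem.Chars.strip l)) 0 [] ≠ [] := by
        apply split0_ne_nil
        apply PySem.List.pyGetD_mem
        refine ⟨by omega, by omega⟩
      have h1 : PySem.List.pyGetD (PySem.Chars.split₀ (PySem.Chars.strip l)) 1 [] ≠ [] := by
        apply split0_ne_nil
        apply PySem.List.pyGetD_mem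
        refine ⟨by omega, by omega⟩
      rw [if_pos h, if_pos ⟨ofList_ne_empty h0, ofList_ne_empty h1⟩, ih]
      simp [pvEdges, pvNodes, h, PySem.Set.update_cons, List.append_assoc]
    · rw [if_neg h, ih]
      simp [pvEdges, pvNodes, h]

-- the list B's prev-scan produces, as a recursion on the input
def pvUniqPrev (prev : Option String) : List String → List String
  | [] => []
  | x :: t => if some x = prev then pvUniqPrev (some x) t else x :: pvUniqPrev (some x) t

-- B's foldl prev-scan computes pvUniqPrev
lemma foldB_eq (l : List String) (acc : List String) (prev : Option String) :
    l.foldl (fun (st : List String × Option String) x =>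
        if some x ≠ st.2 then (st.1 ++ [x], some x) else st) (acc, prev)
      = (acc ++ pvUniqPrev prev l, l.getLast?.or prev) := by
  induction l generalizing acc prev with
  | nil => simp [pvUniqPrev]
  | cons x t ih =>
    simp only [List.foldl_cons]
    by_cases h : some x = prev
    · rw [if_neg (by simp [h]), ih]
      subst h
      cases t with
      | nil => simp [pvUniqPrev]
      | cons y t' => simp [pvUniqPrev, List.getLast?_cons]
    · rw [if_pos (by simpa using h), ih]
      cases t with
      | nil => simp [pvUniqPrev, h]
      | cons y t' => simp [pvUniqPrev, h, List.getLast?_cons, Option.some_or, List.append_assoc]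

-- adjacent-dedup form used to reason about the scan
def pvUniqAdj : List String → List String
  | [] => []
  | [x] => [x]
  | x :: y :: t => if x == y then pvUniqAdj (y :: t) else x :: pvUniqAdj (y :: t)

lemma uniqPrev_some_eq (t : List String) (x : String) :
    pvUniqAdj (x :: t) = x :: pvUniqPrev (some x) t := by
  induction t generalizing x with
  | nil => simp [pvUniqAdj, pvUniqPrev]
  | cons y t' ih =>
    by_cases h : x = y
    · subst h
      simp [pvUniqAdj, pvUniqPrev, ih]
    · have hb : (x == y) = false := by simp [h]
      simp only [pvUniqAdj, hb, Bool.false_eq_true, if_false, pvUniqPrev,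
        if_neg (by simp [Ne.symm h] : ¬ (some y = some x))]
      rw [ih]

lemma uniqPrev_none_eq (l : List String) : pvUniqPrev none l = pvUniqAdj l := by
  cases l with
  | nil => rfl
  | cons x t =>
    rw [uniqPrev_some_eq]
    simp [pvUniqPrev]

-- pvUniqAdj keeps membership
lemma mem_uniqAdj (l : List String) (x : String) : x ∈ pvUniqAdj l ↔ x ∈ l := by
  induction l with
  | nil => simp [pvUniqAdj]
  | cons a t ih =>
    cases t with
    | nil => simp [pvUniqAdj]
    | cons b t' =>
      by_cases h : a = b
      · subst h
        simp only [pvUniqAdj, beq_self_eq_true, if_true]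
        rw [ih]
        simp
      · have hb : (a == b) = false := by simp [h]
        simp only [pvUniqAdj, hb, Bool.false_eq_true, if_false]
        simp [ih]

-- pvUniqAdj of a ≤-sorted list is strictly increasing
lemma uniqAdj_pairwise_lt (l : List String) (h : l.Pairwise (· ≤ ·)) :
    (pvUniqAdj l).Pairwise (· < ·) := by
  induction l with
  | nil => simp [pvUniqAdj]
  | cons a t ih =>
    cases t with
    | nil => simp [pvUniqAdj]
    | cons b t' =>
      rcases List.pairwise_cons.mp h with ⟨hale, ht⟩
      by_cases hab : a = b
      · subst hab
        simpa [pvUniqAdj] using ih ht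
      · have hb : (a == b) = false := by simp [hab]
        simp only [pvUniqAdj, hb, Bool.false_eq_true, if_false]
        refine List.pairwise_cons.mpr ⟨?_, ih ht⟩
        intro z hz
        have hzmem : z ∈ b :: t' := (mem_uniqAdj _ _).mp hz
        have haz : a ≤ z := hale z hzmem
        have hne : a ≠ z := by
          rintro rfl
          rcases List.mem_cons.mp hzmem with h1 | h1
          · exact hab h1
          · have hba : b ≤ a := (List.pairwise_cons.mp ht).1 a h1
            exact hab (le_antisymm (hale b (List.mem_cons_self)) hba)
        exact lt_of_le_of_ne haz hne

-- sorted(set(xs)) is exactly adjacent-dedup of sorted(xs)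
lemma uniqAdj_sorted_eq (xs : List String) :
    PySem.List.sorted (PySem.Set.ofList xs) (fun x => x) false
      = pvUniqAdj (PySem.List.sorted xs (fun x => x) false) := by
  apply PySem.List.sorted_eq_of_perm_of_pairwise_lt
  · apply (List.perm_ext_iff_of_nodup ?_ ?_).mpr
    · intro a
      rw [mem_uniqAdj, PySem.List.mem_sorted, PySem.Set.mem_ofList]
    · exact ((uniqAdj_pairwise_lt _ (by simpa using PySem.List.sorted_pairwise xs (fun x => x))).imp
          (fun h => ne_of_lt h))
    · exact PySem.Set.nodup_ofList xs
  · simpa using uniqAdj_pairwise_lt _ (by simpa using PySem.List.sorted_pairwise xs (fun x => x))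

theorem parse_edge_list_eq (s : String) : parse_edge_list s = parse_edge_list_alt s := by
  simp only [parse_edge_list, parse_edge_list_alt]
  rw [foldA_eq, foldB_eq]
  have hset : PySem.Set.update PySem.Set.empty
      (pvNodes (PySem.Chars.splitlines (PySem.Chars.strip s.toList)))
      = PySem.Set.ofList (pvNodes (PySem.Chars.splitlines (PySem.Chars.strip s.toList))) := by
    simp [PySem.Set.ofList_eq_foldl, PySem.Set.update, PySem.Set.empty]
  rw [hset, uniqPrev_none_eq]
  have := uniqAdj_sorted_eq (pvNodes (PySem.Chars.splitlines (PySem.Chars.strip s.toList)))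
  simp only [pvNodes, pvEdges] at this ⊢
  rw [this]
  simp

-- ===== VERDICT (by name: the statement is the Claim_ definition above) =====
theorem parse_edge_list_spec : Claim_equal_parse_edge_list := by
  intro s _
  unfold Spec_parse_edge_list
  exact parse_edge_list_eq s
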